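-- pv_equiv track=rewrite | github.com/thehalleyyoung/deppy | deppy/pipeline/exception_sources.py | _is_subclass_name
-- ===== SOURCE A (Python) =====
-- _EXCEPTION_HIERARCHY: dict[str, set[str]] = {
--     "BaseException": {"Exception", "KeyboardInterrupt", "SystemExit",
--                       "GeneratorExit"},
--     "Exception": {"ArithmeticError", "LookupError", "OSError", "ValueError",
--                   "TypeError", "AttributeError", "NameError", "ImportError",
--                   "RuntimeError", "StopIteration", "AssertionError",
--                   "UnicodeError", "BufferError", "EOFError"},
--     "ArithmeticError": {"ZeroDivisionError", "OverflowError",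
--                         "FloatingPointError"},
--     "LookupError": {"IndexError", "KeyError"},
--     "OSError": {"FileNotFoundError", "PermissionError", "FileExistsError",
--                 "IsADirectoryError", "NotADirectoryError", "TimeoutError",
--                 "ConnectionError", "BrokenPipeError"},
--     "RuntimeError": {"RecursionError", "NotImplementedError"},
--     "ValueError": {"UnicodeError", "UnicodeDecodeError", "UnicodeEncodeError"},
--     "ImportError": {"ModuleNotFoundError"},
--     "ConnectionError": {"ConnectionRefusedError", "ConnectionResetError",
--                         "ConnectionAbortedError"},
-- }
--
-- def _is_subclass_name(child: str, parents: set[str]) -> bool: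
--     """Check if exception class *child* is a subclass of any *parent*."""
--     if child in parents:
--         return True
--     # Walk up the hierarchy
--     for parent, children in _EXCEPTION_HIERARCHY.items():
--         if child in children and parent in parents:
--             return True
--     # Transitive check
--     for parent, children in _EXCEPTION_HIERARCHY.items():
--         if child in children:
--             if _is_subclass_name(parent, parents):
--                 return True
--     return False
-- ===== SOURCE B (Python) =====
-- _EXCEPTION_HIERARCHY: dict[str, set[str]] = {
--     "BaseException": {"Exception", "KeyboardInterrupt", "SystemExit",
--                       "GeneratorExit"},
--     "Exception": {"ArithmeticError", "LookupError", "OSError", "ValueError",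
--                   "TypeError", "AttributeError", "NameError", "ImportError",
--                   "RuntimeError", "StopIteration", "AssertionError",
--                   "UnicodeError", "BufferError", "EOFError"},
--     "ArithmeticError": {"ZeroDivisionError", "OverflowError",
--                         "FloatingPointError"},
--     "LookupError": {"IndexError", "KeyError"},
--     "OSError": {"FileNotFoundError", "PermissionError", "FileExistsError",
--                 "IsADirectoryError", "NotADirectoryError", "TimeoutError",
--                 "ConnectionError", "BrokenPipeError"},
--     "RuntimeError": {"RecursionError", "NotImplementedError"},
--     "ValueError": {"UnicodeError", "UnicodeDecodeError", "UnicodeEncodeError"},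
--     "ImportError": {"ModuleNotFoundError"},
--     "ConnectionError": {"ConnectionRefusedError", "ConnectionResetError",
--                         "ConnectionAbortedError"},
-- }
--
-- def _is_subclass_name(child: str, parents: set[str]) -> bool:
--     """Check if exception class *child* is a subclass of any *parent*.
--
--     Iterative fixed-point closure instead of recursion: compute the set of
--     *child* plus all its (transitive) ancestors by repeatedly adding the
--     parents of any current member; the hierarchy depth is at most its size,
--     so len(_EXCEPTION_HIERARCHY) rounds reach the fixed point.
--     """
--     anc = {child}
--     for _ in range(len(_EXCEPTION_HIERARCHY)):
--         anc |= {p for p, cs in _EXCEPTION_HIERARCHY.items()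
--                 if not cs.isdisjoint(anc)}
--     return any(a in parents for a in anc)
-- ===== Notes on version B (the rewrite author's own statement) =====
-- stated objective: alternative
-- what changed: Replaces A's recursive walk that rescans the whole hierarchy dict at every recursion level with an iterative fixed-point computation of the ancestor set (repeatedly adding the parents of any current member) followed by a single membership test against parents.
import Mathlib
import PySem

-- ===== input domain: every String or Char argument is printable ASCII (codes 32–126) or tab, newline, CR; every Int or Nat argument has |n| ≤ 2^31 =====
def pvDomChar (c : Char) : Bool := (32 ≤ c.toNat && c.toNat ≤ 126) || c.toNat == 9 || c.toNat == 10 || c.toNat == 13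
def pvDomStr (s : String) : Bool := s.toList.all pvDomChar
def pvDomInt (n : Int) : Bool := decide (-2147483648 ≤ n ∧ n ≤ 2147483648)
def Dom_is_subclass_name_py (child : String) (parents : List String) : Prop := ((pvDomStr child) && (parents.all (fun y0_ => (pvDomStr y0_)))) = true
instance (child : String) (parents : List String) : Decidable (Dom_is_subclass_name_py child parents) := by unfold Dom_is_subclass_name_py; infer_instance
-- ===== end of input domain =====

-- B replaces A's recursive repeated-scan of the hierarchy by an iterative
-- fixed-point closure of the ancestor set followed by one intersection test
-- (objective: alternative decomposition, same exact result).

-- _EXCEPTION_HIERARCHY (module constant): dict[str, set[str]] in source order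
def pvHier : List (String × List String) :=
  [("BaseException", ["Exception", "KeyboardInterrupt", "SystemExit", "GeneratorExit"]),
   ("Exception", ["ArithmeticError", "LookupError", "OSError", "ValueError",
                  "TypeError", "AttributeError", "NameError", "ImportError",
                  "RuntimeError", "StopIteration", "AssertionError",
                  "UnicodeError", "BufferError", "EOFError"]),
   ("ArithmeticError", ["ZeroDivisionError", "OverflowError", "FloatingPointError"]),
   ("LookupError", ["IndexError", "KeyError"]),
   ("OSError", ["FileNotFoundError", "PermissionError", "FileExistsError",
                "IsADirectoryError", "NotADirectoryError", "TimeoutError",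
                "ConnectionError", "BrokenPipeError"]),
   ("RuntimeError", ["RecursionError", "NotImplementedError"]),
   ("ValueError", ["UnicodeError", "UnicodeDecodeError", "UnicodeEncodeError"]),
   ("ImportError", ["ModuleNotFoundError"]),
   ("ConnectionError", ["ConnectionRefusedError", "ConnectionResetError", "ConnectionAbortedError"])]

-- termination measure for A's recursion: depth of a name below BaseException
-- (a parent in the table always has strictly smaller rank than its children)
def pvRankTable : List (String × Nat) :=
  [("BaseException", 0),
   ("Exception", 1), ("KeyboardInterrupt", 1), ("SystemExit", 1), ("GeneratorExit", 1),
   ("ArithmeticError", 2), ("LookupError", 2), ("OSError", 2), ("ValueError", 2),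
   ("TypeError", 2), ("AttributeError", 2), ("NameError", 2), ("ImportError", 2),
   ("RuntimeError", 2), ("StopIteration", 2), ("AssertionError", 2),
   ("BufferError", 2), ("EOFError", 2),
   ("UnicodeError", 3), ("UnicodeDecodeError", 3), ("UnicodeEncodeError", 3),
   ("ZeroDivisionError", 3), ("OverflowError", 3), ("FloatingPointError", 3),
   ("IndexError", 3), ("KeyError", 3),
   ("FileNotFoundError", 3), ("PermissionError", 3), ("FileExistsError", 3),
   ("IsADirectoryError", 3), ("NotADirectoryError", 3), ("TimeoutError", 3),
   ("ConnectionError", 3), ("BrokenPipeError", 3),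
   ("RecursionError", 3), ("NotImplementedError", 3), ("ModuleNotFoundError", 3),
   ("ConnectionRefusedError", 4), ("ConnectionResetError", 4), ("ConnectionAbortedError", 4)]

def pvRank (s : String) : Nat := ((pvRankTable.find? (fun e => e.1 == s)).map (fun e => e.2)).getD 5

theorem pvRank_lt_of_mem {p : String} {cs : List String} {c : String}
    (he : (p, cs) ∈ pvHier) (hc : c ∈ cs) : pvRank p < pvRank c := by
  have h : ∀ e ∈ pvHier, ∀ c ∈ e.2, pvRank e.1 < pvRank c := by decide
  exact h (p, cs) he c hc

-- ===== PORT A =====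
-- literal transliteration of _is_subclass_name (Python A)
def is_subclass_name_py (child : String) (parents : List String) : Bool :=
  if parents.contains child then true
  else if pvHier.any (fun e => e.2.contains child && parents.contains e.1) then true
  else pvHier.attach.any (fun e =>
    if h : e.1.2.contains child = true then is_subclass_name_py e.1.1 parents else false)
termination_by pvRank child
decreasing_by
  exact pvRank_lt_of_mem (by simpa using e.2) (by simpa using h)

-- ===== PORT B =====
-- one round of Source B's loop body: anc |= {p for p, cs in H.items() if not cs.isdisjoint(anc)}
def pvStep (S : PySem.Set String) : PySem.Set String :=
  PySem.Set.union S
    (PySem.Set.ofList ((pvHier.filter (fun e => !(PySem.Set.isdisjoint e.2 S))).map (fun e => e.1)))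

-- transliteration of Source B
def is_subclass_name_py_alt (child : String) (parents : List String) : Bool :=
  let anc := (PySem.List.pyRange 0 (Int.ofNat pvHier.length) 1).foldl
               (fun S _ => pvStep S) (PySem.Set.ofList [child])
  anc.any (fun a => parents.contains a)

-- ===== PRECONDITION & SPEC =====
def Spec_is_subclass_name_py (child : String) (parents : List String) (out : Bool) : Prop := out = is_subclass_name_py_alt child parents
instance (child : String) (parents : List String) (out : Bool) : Decidable (Spec_is_subclass_name_py child parents out) := by unfold Spec_is_subclass_name_py; infer_instance

-- ===== CLAIM (what is proved, stated in full; the proofs are below) =====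
def Claim_equal_is_subclass_name_py : Prop := ∀ (child : String) (parents : List String), Dom_is_subclass_name_py child parents → Spec_is_subclass_name_py child parents (is_subclass_name_py child parents)

-- ===== LEMMAS AND PROOFS =====

-- direct parents of c in the table
def pvDparents (c : String) : List String :=
  (pvHier.filter (fun e => e.2.contains c)).map (fun e => e.1)

theorem mem_pvDparents {q c : String} :
    q ∈ pvDparents c ↔ ∃ cs, (q, cs) ∈ pvHier ∧ c ∈ cs := by
  simp only [pvDparents, List.mem_map, List.mem_filter]
  constructor
  · rintro ⟨e, ⟨he, hc⟩, rfl⟩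
    exact ⟨e.2, he, by simpa using hc⟩
  · rintro ⟨cs, he, hc⟩
    exact ⟨(q, cs), ⟨he, by simpa using hc⟩, rfl⟩

theorem pvRank_lt_of_dparents {q c : String} (h : q ∈ pvDparents c) : pvRank q < pvRank c := by
  obtain ⟨cs, he, hc⟩ := mem_pvDparents.mp h
  exact pvRank_lt_of_mem he hc

-- c together with all its (transitive) ancestors in the table
def pvReach (c : String) : List String :=
  c :: (pvDparents c).attach.flatMap (fun q => pvReach q.1)
termination_by pvRank c
decreasing_by
  exact pvRank_lt_of_dparents q.2

theorem mem_pvReach {x c : String} :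
    x ∈ pvReach c ↔ x = c ∨ ∃ q ∈ pvDparents c, x ∈ pvReach q := by
  conv_lhs => rw [pvReach]
  simp [List.mem_flatMap]

theorem self_mem_pvReach (c : String) : c ∈ pvReach c := mem_pvReach.mpr (Or.inl rfl)

theorem pvReach_trans {x : String} :
    ∀ (n : Nat) (c : String), pvRank c ≤ n → ∀ q ∈ pvReach c, x ∈ pvReach q → x ∈ pvReach c := by
  intro n
  induction n with
  | zero =>
    intro c hc q hq hx
    rcases mem_pvReach.mp hq with rfl | ⟨q', hq', _⟩
    · exact hx
    · exact absurd (pvRank_lt_of_dparents hq') (by omega)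
  | succ n ih =>
    intro c hc q hq hx
    rcases mem_pvReach.mp hq with rfl | ⟨q', hq', hq2⟩
    · exact hx
    · have hr := pvRank_lt_of_dparents hq'
      exact mem_pvReach.mpr (Or.inr ⟨q', hq', ih q' (by omega) q hq2 hx⟩)

-- unfolding of the reach-membership test one level
theorem any_reach_unfold (c : String) (p : List String) :
    (pvReach c).any (fun a => p.contains a) =
      (p.contains c || (pvDparents c).any (fun q => (pvReach q).any (fun a => p.contains a))) := by
  conv_lhs => rw [pvReach]
  simp only [List.any_cons]
  congr 1
  rw [Bool.eq_iff_iff]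
  simp only [List.any_eq_true, List.mem_flatMap, List.mem_attach, true_and]
  constructor
  · rintro ⟨a, ⟨⟨q, hq⟩, ha⟩, hf⟩
    exact ⟨q, hq, a, ha, hf⟩
  · rintro ⟨q, hq, a, ha, hf⟩
    exact ⟨a, ⟨⟨q, hq⟩, ha⟩, hf⟩

-- characterization of A: membership of some reachable ancestor (or child itself) in parents
theorem A_eq_reach (c : String) (p : List String) :
    is_subclass_name_py c p = (pvReach c).any (fun a => p.contains a) := by
  suffices h : ∀ (n : Nat) (c : String), pvRank c ≤ n → ∀ p,
      is_subclass_name_py c p = (pvReach c).any (fun a => p.contains a) from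
    h (pvRank c) c le_rfl p
  intro n
  induction n with
  | zero =>
    intro c hc p
    rw [is_subclass_name_py, any_reach_unfold]
    have hnone : ∀ e ∈ pvHier, c ∉ e.2 := by
      intro e he hmem
      exact absurd (pvRank_lt_of_mem (p := e.1) (by simpa using he) hmem) (by omega)
    have hdp : pvDparents c = [] := by
      rcases hdp : pvDparents c with _ | ⟨q, l⟩
      · rfl
      · have : q ∈ pvDparents c := by rw [hdp]; exact List.mem_cons_self
        exact absurd (pvRank_lt_of_dparents this) (by omega)
    have h1 : pvHier.any (fun e => e.2.contains c && p.contains e.1) = false := by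
      simp only [List.any_eq_false]
      intro e he
      simp [hnone e he]
    have h2 : pvHier.attach.any (fun e =>
        if h : e.1.2.contains c = true then is_subclass_name_py e.1.1 p else false) = false := by
      simp only [List.any_eq_false]
      intro e _
      simp [hnone e.1 e.2]
    rw [h1, h2, hdp]
    simp
  | succ n ih =>
    intro c hc p
    rw [is_subclass_name_py, any_reach_unfold]
    cases hp : p.contains c
    · simp only [Bool.false_eq_true, if_false, Bool.false_or]
      rw [Bool.eq_iff_iff]
      constructor
      · intro hh
        split at hh
        · next h1 =>
          -- first loop hit: a direct parent of c is in p
          simp only [List.any_eq_true, Bool.and_eq_true] at h1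
          obtain ⟨e, he, hcc, hpe⟩ := h1
          have hq : e.1 ∈ pvDparents c :=
            mem_pvDparents.mpr ⟨e.2, by simpa using he, by simpa using hcc⟩
          simp only [List.any_eq_true]
          exact ⟨e.1, hq, e.1, self_mem_pvReach e.1, hpe⟩
        · simp only [List.any_eq_true, List.mem_attach, true_and] at hh
          obtain ⟨e, hee⟩ := hh
          rw [dite_eq_ite] at hee
          split at hee
          · next hcc =>
            have hmem : c ∈ e.1.2 := by simpa using hcc
            have hrank : pvRank e.1.1 ≤ n := by
              have := pvRank_lt_of_mem (p := e.1.1) (by simpa using e.2) hmem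
              omega
            rw [ih e.1.1 hrank p] at hee
            have hq : e.1.1 ∈ pvDparents c :=
              mem_pvDparents.mpr ⟨e.1.2, by simpa using e.2, hmem⟩
            simp only [List.any_eq_true] at hee ⊢
            obtain ⟨x, hx, hpx⟩ := hee
            exact ⟨e.1.1, hq, x, hx, hpx⟩
          · exact absurd hee (by simp)
      · intro hh
        simp only [List.any_eq_true] at hh
        obtain ⟨q, hq, x, hx, hpx⟩ := hh
        obtain ⟨cs, he, hccs⟩ := mem_pvDparents.mp hq
        split
        · rfl
        · simp only [List.any_eq_true, List.mem_attach, true_and]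
          refine ⟨⟨(q, cs), he⟩, ?_⟩
          have hcc : (q, cs).2.contains c = true := by simpa using hccs
          rw [dif_pos hcc]
          have hrank : pvRank q ≤ n := by
            have := pvRank_lt_of_mem he hccs; omega
          rw [ih q hrank p]
          simp only [List.any_eq_true]
          exact ⟨x, hx, hpx⟩
    · simp

-- Source B's loop, as iteration of pvStep
def pvIter : Nat → PySem.Set String → PySem.Set String
  | 0, S => S
  | n + 1, S => pvIter n (pvStep S)

theorem foldl_const_eq_pvIter (l : List Int) (S : PySem.Set String) :
    l.foldl (fun S _ => pvStep S) S = pvIter l.length S := by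
  induction l generalizing S with
  | nil => rfl
  | cons a l ih => simp [List.foldl_cons, pvIter, ih]

theorem B_eq_iter (c : String) (p : List String) :
    is_subclass_name_py_alt c p = (pvIter 9 (PySem.Set.ofList [c])).any (fun a => p.contains a) := by
  unfold is_subclass_name_py_alt
  rw [foldl_const_eq_pvIter]
  have hl : (PySem.List.pyRange 0 (Int.ofNat pvHier.length) 1).length = 9 := by decide
  rw [hl]

theorem mem_pvStep {x : String} {S : PySem.Set String} :
    x ∈ pvStep S ↔ x ∈ S ∨ ∃ e ∈ pvHier, x = e.1 ∧ ∃ y ∈ e.2, y ∈ S := by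
  simp only [pvStep, PySem.Set.mem_union, PySem.Set.mem_ofList, List.mem_map, List.mem_filter]
  constructor
  · rintro (h | ⟨e, ⟨he, hd⟩, rfl⟩)
    · exact Or.inl h
    · refine Or.inr ⟨e, he, rfl, ?_⟩
      by_contra hno
      have : PySem.Set.isdisjoint e.2 S = true :=
        (PySem.Set.isdisjoint_iff e.2 S).mpr (fun y hy hyS => hno ⟨y, hy, hyS⟩)
      simp [this] at hd
  · rintro (h | ⟨e, he, rfl, y, hy, hyS⟩)
    · exact Or.inl h
    · refine Or.inr ⟨e, ⟨he, ?_⟩, rfl⟩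
      cases hd : PySem.Set.isdisjoint e.2 S
      · simp
      · exact absurd hyS ((PySem.Set.isdisjoint_iff e.2 S).mp hd y hy)

theorem mem_pvIter_of_mem {x : String} {S : PySem.Set String} :
    ∀ n, x ∈ S → x ∈ pvIter n S := by
  intro n
  induction n generalizing S with
  | zero => exact fun h => h
  | succ n ih => exact fun h => ih (mem_pvStep.mpr (Or.inl h))

theorem iter_sub_reach {c : String} :
    ∀ (n : Nat) (S : PySem.Set String), (∀ x ∈ S, x ∈ pvReach c) →
      ∀ x ∈ pvIter n S, x ∈ pvReach c := by
  intro n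
  induction n with
  | zero => exact fun S hS x hx => hS x hx
  | succ n ih =>
    intro S hS x hx
    refine ih (pvStep S) ?_ x hx
    intro z hz
    rcases mem_pvStep.mp hz with h | ⟨e, he, rfl, y, hy, hyS⟩
    · exact hS z h
    · have hyR : y ∈ pvReach c := hS y hyS
      have hdp : e.1 ∈ pvDparents y := mem_pvDparents.mpr ⟨e.2, by simpa using he, hy⟩
      have hzR : e.1 ∈ pvReach y := mem_pvReach.mpr (Or.inr ⟨e.1, hdp, self_mem_pvReach e.1⟩)
      exact pvReach_trans (pvRank c) c le_rfl y hyR hzR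

theorem reach_sub_iter {x : String} :
    ∀ (n : Nat) (c : String) (S : PySem.Set String), c ∈ S → pvRank c ≤ n →
      x ∈ pvReach c → x ∈ pvIter n S := by
  intro n
  induction n with
  | zero =>
    intro c S hcS _ hx
    rcases mem_pvReach.mp hx with rfl | ⟨q, hq, _⟩
    · exact hcS
    · exact absurd (pvRank_lt_of_dparents hq) (by omega)
  | succ n ih =>
    intro c S hcS hc hx
    rcases mem_pvReach.mp hx with rfl | ⟨q, hq, hxq⟩
    · exact mem_pvIter_of_mem (n + 1) hcS
    · obtain ⟨cs, he, hccs⟩ := mem_pvDparents.mp hq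
      have hqS : q ∈ pvStep S := mem_pvStep.mpr (Or.inr ⟨(q, cs), he, rfl, c, hccs, hcS⟩)
      have hr := pvRank_lt_of_dparents hq
      exact ih q (pvStep S) hqS (by omega) hxq

theorem pvRank_le_five (c : String) : pvRank c ≤ 5 := by
  unfold pvRank
  cases h : pvRankTable.find? (fun e => e.1 == c) with
  | none => simp
  | some e =>
    have he : e ∈ pvRankTable := List.mem_of_find?_eq_some h
    have : ∀ e ∈ pvRankTable, e.2 ≤ 5 := by decide
    simpa using this e he

theorem iter_eq_reach_members {c x : String} :
    x ∈ pvIter 9 (PySem.Set.ofList [c]) ↔ x ∈ pvReach c := by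
  constructor
  · intro h
    refine iter_sub_reach 9 _ ?_ x h
    intro z hz
    have : z = c := by simpa [PySem.Set.mem_ofList] using hz
    subst this; exact self_mem_pvReach z
  · intro h
    refine reach_sub_iter 9 c _ ?_ ?_ h
    · simp [PySem.Set.mem_ofList]
    · have := pvRank_le_five c; omega

theorem any_congr_mem {l1 l2 : List String} (f : String → Bool)
    (h : ∀ x, x ∈ l1 ↔ x ∈ l2) : l1.any f = l2.any f := by
  rw [Bool.eq_iff_iff]
  simp only [List.any_eq_true]
  constructor
  · rintro ⟨x, hx, hf⟩; exact ⟨x, (h x).mp hx, hf⟩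
  · rintro ⟨x, hx, hf⟩; exact ⟨x, (h x).mpr hx, hf⟩

theorem A_eq_B (c : String) (p : List String) :
    is_subclass_name_py c p = is_subclass_name_py_alt c p := by
  rw [A_eq_reach, B_eq_iter]
  exact any_congr_mem _ (fun x => iter_eq_reach_members.symm)

-- ===== VERDICT (by name: the statement is the Claim_ definition above) =====
theorem is_subclass_name_py_spec : Claim_equal_is_subclass_name_py := by
  intro c p _
  exact A_eq_B c p
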